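-- pv_equiv track=rewrite | github.com/ZeelRamoliya07/AI202-AI- | LabAssignment/A11/q2.py | partial_check
-- ===== SOURCE A (Python) =====
-- def partial_check(assignment):
--     """
--     Column-by-column check from rightmost digit (units) leftward.
--     Only checks a column if all its letters are assigned.
--     Uses carry propagation for early pruning.
--
--     Column layout (right to left):
--       col0 (units)    :  D + E = Y  + 10*c1
--       col1 (tens)     :  N + R + c1 = E  + 10*c2
--       col2 (hundreds) :  E + O + c2 = N  + 10*c3
--       col3 (thousands):  S + M + c3 = O  + 10*c4
--       col4 (ten-thou) :  c4         = M
--     """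
--     a = assignment
--
--     # Each carry can only be 0 or 1 (sum of two single digits + carry ≤ 19)
--     for c1 in range(2):
--         # Column 0: D + E = Y + 10*c1
--         if all(v in a for v in ['D', 'E', 'Y']):
--             if (a['D'] + a['E']) % 10 != a['Y']:
--                 continue
--             if (a['D'] + a['E']) // 10 != c1:
--                 continue
--
--         for c2 in range(2):
--             # Column 1: N + R + c1 = E + 10*c2
--             if all(v in a for v in ['N', 'R', 'E']):
--                 if (a['N'] + a['R'] + c1) % 10 != a['E']:
--                     continue
--                 if (a['N'] + a['R'] + c1) // 10 != c2:
--                     continue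
--
--             for c3 in range(2):
--                 # Column 2: E + O + c2 = N + 10*c3
--                 if all(v in a for v in ['E', 'O', 'N']):
--                     if (a['E'] + a['O'] + c2) % 10 != a['N']:
--                         continue
--                     if (a['E'] + a['O'] + c2) // 10 != c3:
--                         continue
--
--                 for c4 in range(2):
--                     # Column 3: S + M + c3 = O + 10*c4
--                     if all(v in a for v in ['S', 'M', 'O']):
--                         if (a['S'] + a['M'] + c3) % 10 != a['O']:
--                             continue
--                         if (a['S'] + a['M'] + c3) // 10 != c4:
--                             continue
--
--                     # Column 4: c4 = M
--                     if 'M' in a: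
--                         if c4 != a['M']:
--                             continue
--
--                     return None  # At least one carry combo is consistent
--
--     return False   # All carry combos failed → contradiction
-- ===== SOURCE B (Python) =====
-- _COLUMNS = [
--     (['D', 'E'], 0, 'Y', 1),
--     (['N', 'R'], 1, 'E', 2),
--     (['E', 'O'], 2, 'N', 3),
--     (['S', 'M'], 3, 'O', 4),
--     ([], 4, 'M', 5),
-- ]
--
--
-- def _column_ok(assignment, col, carries):
--     left, cin, right, cout = col
--     if any(v not in assignment for v in left + [right]):
--         return True
--     total = sum(assignment[v] for v in left) + carries[cin]
--     return total % 10 == assignment[right] and total // 10 == carries[cout]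
--
--
-- def partial_check(assignment):
--     for mask in range(16):
--         carries = (0, (mask >> 3) & 1, (mask >> 2) & 1, (mask >> 1) & 1, mask & 1, 0)
--         if all(_column_ok(assignment, col, carries) for col in _COLUMNS):
--             return None
--     return False
-- ===== Notes on version B (the rewrite author's own statement) =====
-- stated objective: simpler
-- what changed: A's five hard-coded column checks inside four nested carry loops with continue statements become a data-driven table of columns (left letters, carry-in index, result letter, carry-out index) validated uniformly against each of the 16 carry bitmasks.
import Mathlib
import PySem

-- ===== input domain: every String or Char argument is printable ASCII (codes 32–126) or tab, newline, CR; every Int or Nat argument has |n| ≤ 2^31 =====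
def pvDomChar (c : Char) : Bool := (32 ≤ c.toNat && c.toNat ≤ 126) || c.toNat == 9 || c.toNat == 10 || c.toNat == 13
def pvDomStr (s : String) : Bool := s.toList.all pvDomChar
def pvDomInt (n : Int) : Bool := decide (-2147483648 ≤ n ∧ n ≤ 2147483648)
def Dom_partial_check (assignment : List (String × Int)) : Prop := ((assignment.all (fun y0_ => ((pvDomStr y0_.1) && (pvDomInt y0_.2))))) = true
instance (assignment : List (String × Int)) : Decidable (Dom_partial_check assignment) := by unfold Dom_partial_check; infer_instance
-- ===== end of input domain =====

-- B replaces A's five hard-coded nested column checks (with four nested carry loops and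
-- `continue`s) by a data-driven column table validated against all 16 carry masks (objective: simpler decomposition).

-- ===== PORT A =====
-- 'k in assignment' (dict membership = first match on the association list)
def pcMem (a : List (String × Int)) (k : String) : Bool := (a.lookup k).isSome
-- 'assignment[k]' — only evaluated by either Python under a membership guard, so a default is exact
def pcVal (a : List (String × Int)) (k : String) : Int := (a.lookup k).getD 0

def partial_check (assignment : List (String × Int)) : Option Bool :=
  let a := assignment
  if (PySem.List.pyRange 0 2 1).any (fun c1 =>
      (if (["D", "E", "Y"].all (fun v => pcMem a v)) then
          (PySem.Int.mod (pcVal a "D" + pcVal a "E") 10 == pcVal a "Y")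
          && (PySem.Int.floordiv (pcVal a "D" + pcVal a "E") 10 == c1)
        else true)
      && (PySem.List.pyRange 0 2 1).any (fun c2 =>
        (if (["N", "R", "E"].all (fun v => pcMem a v)) then
            (PySem.Int.mod (pcVal a "N" + pcVal a "R" + c1) 10 == pcVal a "E")
            && (PySem.Int.floordiv (pcVal a "N" + pcVal a "R" + c1) 10 == c2)
          else true)
        && (PySem.List.pyRange 0 2 1).any (fun c3 =>
          (if (["E", "O", "N"].all (fun v => pcMem a v)) then
              (PySem.Int.mod (pcVal a "E" + pcVal a "O" + c2) 10 == pcVal a "N")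
              && (PySem.Int.floordiv (pcVal a "E" + pcVal a "O" + c2) 10 == c3)
            else true)
          && (PySem.List.pyRange 0 2 1).any (fun c4 =>
            (if (["S", "M", "O"].all (fun v => pcMem a v)) then
                (PySem.Int.mod (pcVal a "S" + pcVal a "M" + c3) 10 == pcVal a "O")
                && (PySem.Int.floordiv (pcVal a "S" + pcVal a "M" + c3) 10 == c4)
              else true)
            && (if pcMem a "M" then c4 == pcVal a "M" else true)))))
  then none else some false

-- ===== PORT B =====
def pcColumns : List (List String × Nat × String × Nat) :=
  [(["D", "E"], 0, "Y", 1),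
   (["N", "R"], 1, "E", 2),
   (["E", "O"], 2, "N", 3),
   (["S", "M"], 3, "O", 4),
   ([], 4, "M", 5)]

-- carries[i], a tuple index that is always in range, is ported as getD
def pcColumnOk (a : List (String × Int)) (col : List String × Nat × String × Nat)
    (carries : List Int) : Bool :=
  match col with
  | (left, cin, right, cout) =>
    if (left ++ [right]).any (fun v => !(pcMem a v)) then true
    else
      let total := (left.map (fun v => pcVal a v)).sum + carries.getD cin 0
      (PySem.Int.mod total 10 == pcVal a right)
      && (PySem.Int.floordiv total 10 == carries.getD cout 0)

def partial_check_alt (assignment : List (String × Int)) : Option Bool :=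
  if (List.range 16).any (fun mask =>
      pcColumns.all (fun col => pcColumnOk assignment col
        [0, (((mask >>> 3) &&& 1 : Nat) : Int), (((mask >>> 2) &&& 1 : Nat) : Int),
         (((mask >>> 1) &&& 1 : Nat) : Int), ((mask &&& 1 : Nat) : Int), 0]))
  then none else some false

-- ===== PRECONDITION & SPEC =====
def Spec_partial_check (assignment : List (String × Int)) (out : Option Bool) : Prop := out = partial_check_alt assignment
instance (assignment : List (String × Int)) (out : Option Bool) : Decidable (Spec_partial_check assignment out) := by unfold Spec_partial_check; infer_instance

-- ===== CLAIM (what is proved, stated in full; the proofs are below) =====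
def Claim_equal_partial_check : Prop := ∀ (assignment : List (String × Int)), Dom_partial_check assignment → Spec_partial_check assignment (partial_check assignment)

-- ===== LEMMAS AND PROOFS =====

-- The five column checks of A, one definition per column, abstracted over the carries:
-- the common shape both ports are reduced to.
def pcQ0 (a : List (String × Int)) (c1 : Int) : Bool :=
  if (["D", "E", "Y"].all (fun v => pcMem a v)) then
    (PySem.Int.mod (pcVal a "D" + pcVal a "E") 10 == pcVal a "Y")
    && (PySem.Int.floordiv (pcVal a "D" + pcVal a "E") 10 == c1)
  else true
def pcQ1 (a : List (String × Int)) (c1 c2 : Int) : Bool :=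
  if (["N", "R", "E"].all (fun v => pcMem a v)) then
    (PySem.Int.mod (pcVal a "N" + pcVal a "R" + c1) 10 == pcVal a "E")
    && (PySem.Int.floordiv (pcVal a "N" + pcVal a "R" + c1) 10 == c2)
  else true
def pcQ2 (a : List (String × Int)) (c2 c3 : Int) : Bool :=
  if (["E", "O", "N"].all (fun v => pcMem a v)) then
    (PySem.Int.mod (pcVal a "E" + pcVal a "O" + c2) 10 == pcVal a "N")
    && (PySem.Int.floordiv (pcVal a "E" + pcVal a "O" + c2) 10 == c3)
  else true
def pcQ3 (a : List (String × Int)) (c3 c4 : Int) : Bool :=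
  if (["S", "M", "O"].all (fun v => pcMem a v)) then
    (PySem.Int.mod (pcVal a "S" + pcVal a "M" + c3) 10 == pcVal a "O")
    && (PySem.Int.floordiv (pcVal a "S" + pcVal a "M" + c3) 10 == c4)
  else true
def pcQ4 (a : List (String × Int)) (c4 : Int) : Bool :=
  if pcMem a "M" then c4 == pcVal a "M" else true

lemma A_eq (a : List (String × Int)) :
    partial_check a =
      (if ([0,1] : List Int).any (fun c1 => pcQ0 a c1 &&
          ([0,1] : List Int).any (fun c2 => pcQ1 a c1 c2 &&
            ([0,1] : List Int).any (fun c3 => pcQ2 a c2 c3 &&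
              ([0,1] : List Int).any (fun c4 => pcQ3 a c3 c4 && pcQ4 a c4))))
       then none else some false) := by
  have hR : PySem.List.pyRange 0 2 1 = [0, 1] := by decide
  simp only [partial_check, pcQ0, pcQ1, pcQ2, pcQ3, pcQ4, hR]
  rfl

-- B's column checker, evaluated on each table row, is the corresponding pcQ
lemma B0 (a : List (String × Int)) (x1 x2 x3 x4 : Int) :
    pcColumnOk a (["D","E"], 0, "Y", 1) [0,x1,x2,x3,x4,0] = pcQ0 a x1 := by
  simp [pcColumnOk, pcQ0]
lemma B1 (a : List (String × Int)) (x1 x2 x3 x4 : Int) :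
    pcColumnOk a (["N","R"], 1, "E", 2) [0,x1,x2,x3,x4,0] = pcQ1 a x1 x2 := by
  simp [pcColumnOk, pcQ1, add_assoc]
lemma B2 (a : List (String × Int)) (x1 x2 x3 x4 : Int) :
    pcColumnOk a (["E","O"], 2, "N", 3) [0,x1,x2,x3,x4,0] = pcQ2 a x2 x3 := by
  simp [pcColumnOk, pcQ2, add_assoc]
lemma B3 (a : List (String × Int)) (x1 x2 x3 x4 : Int) :
    pcColumnOk a (["S","M"], 3, "O", 4) [0,x1,x2,x3,x4,0] = pcQ3 a x3 x4 := by
  simp [pcColumnOk, pcQ3, add_assoc]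
lemma B4 (a : List (String × Int)) (x1 x2 x3 x4 : Int) (h : x4 = 0 ∨ x4 = 1) :
    pcColumnOk a ([], 4, "M", 5) [0,x1,x2,x3,x4,0] = pcQ4 a x4 := by
  rcases h with rfl | rfl <;> simp [pcColumnOk, pcQ4]

lemma bit_cases (m k : Nat) : (((m >>> k) &&& 1 : Nat) : Int) = 0 ∨ (((m >>> k) &&& 1 : Nat) : Int) = 1 := by
  rcases Nat.mod_two_eq_zero_or_one (m >>> k) with h | h <;>
    simp [Nat.and_one_is_mod, h]

lemma B_eq (a : List (String × Int)) :
    partial_check_alt a =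
      (if (List.range 16).any (fun m =>
          pcQ0 a (((m >>> 3) &&& 1 : Nat) : Int) &&
          (pcQ1 a (((m >>> 3) &&& 1 : Nat) : Int) (((m >>> 2) &&& 1 : Nat) : Int) &&
           (pcQ2 a (((m >>> 2) &&& 1 : Nat) : Int) (((m >>> 1) &&& 1 : Nat) : Int) &&
            (pcQ3 a (((m >>> 1) &&& 1 : Nat) : Int) ((m &&& 1 : Nat) : Int) &&
             pcQ4 a ((m &&& 1 : Nat) : Int))))) then none else some false) := by
  have h : ∀ m : Nat,
      (pcColumns.all (fun col => pcColumnOk a col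
        [0, (((m >>> 3) &&& 1 : Nat) : Int), (((m >>> 2) &&& 1 : Nat) : Int),
         (((m >>> 1) &&& 1 : Nat) : Int), ((m &&& 1 : Nat) : Int), 0]))
      = (pcQ0 a (((m >>> 3) &&& 1 : Nat) : Int) &&
          (pcQ1 a (((m >>> 3) &&& 1 : Nat) : Int) (((m >>> 2) &&& 1 : Nat) : Int) &&
           (pcQ2 a (((m >>> 2) &&& 1 : Nat) : Int) (((m >>> 1) &&& 1 : Nat) : Int) &&
            (pcQ3 a (((m >>> 1) &&& 1 : Nat) : Int) ((m &&& 1 : Nat) : Int) &&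
             pcQ4 a ((m &&& 1 : Nat) : Int))))) := by
    intro m
    have h4 := bit_cases m 0
    simp only [Nat.shiftRight_zero] at h4
    simp only [pcColumns, List.all_cons, List.all_nil, Bool.and_true, B0, B1, B2, B3,
      B4 a _ _ _ _ h4]
  simp only [partial_check_alt, h]

-- The combinatorial core: A's four nested two-valued loops enumerate exactly the 16 bit
-- patterns of B's mask loop, in the same order.
lemma enum16 (p0 : Int → Bool) (p1 p2 p3 : Int → Int → Bool) (p4 : Int → Bool) :
    (([0,1] : List Int).any (fun c1 => p0 c1 &&
        ([0,1] : List Int).any (fun c2 => p1 c1 c2 &&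
          ([0,1] : List Int).any (fun c3 => p2 c2 c3 &&
            ([0,1] : List Int).any (fun c4 => p3 c3 c4 && p4 c4)))))
    = (List.range 16).any (fun m =>
        p0 (((m >>> 3) &&& 1 : Nat) : Int) &&
        (p1 (((m >>> 3) &&& 1 : Nat) : Int) (((m >>> 2) &&& 1 : Nat) : Int) &&
         (p2 (((m >>> 2) &&& 1 : Nat) : Int) (((m >>> 1) &&& 1 : Nat) : Int) &&
          (p3 (((m >>> 1) &&& 1 : Nat) : Int) ((m &&& 1 : Nat) : Int) &&
           p4 ((m &&& 1 : Nat) : Int))))) := by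
  have h16 : List.range 16 = [0,1,2,3,4,5,6,7,8,9,10,11,12,13,14,15] := by rfl
  simp only [h16, List.any_cons, List.any_nil, Bool.or_false]
  norm_num [Bool.and_or_distrib_left, Bool.or_assoc, Bool.and_assoc, Nat.shiftRight_eq_div_pow]

-- ===== VERDICT (by name: the statement is the Claim_ definition above) =====
theorem partial_check_spec : Claim_equal_partial_check := by
  intro a _
  unfold Spec_partial_check
  rw [A_eq, B_eq, enum16]
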